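-- pv_equiv track=rewrite | github.com/Ziga12341/Advent-of-Code-2023 | python/Day 1/second_part.py | find_spelled_numbers_by_index
-- ===== SOURCE A (Python) =====
-- list_of_spelled_numbers = ["one", "two", "three", "four", "five", "six", "seven", "eight", "nine"]
--
-- def find_spelled_numbers_by_index(string_line):
--     # dict of all spelled numbers with indexes of its starting chat in line
--     spelling_numbers_indexed = {}
--     for spelled_number in list_of_spelled_numbers:
--         if spelled_number in string_line:
--             spelling_numbers_indexed[string_line.index(spelled_number)] = spelled_number
--
--     if spelling_numbers_indexed:
--         return spelling_numbers_indexed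
--     else:
--         return None
-- ===== SOURCE B (Python) =====
-- list_of_spelled_numbers = ["one", "two", "three", "four", "five", "six", "seven", "eight", "nine"]
--
--
-- def find_spelled_numbers_by_index(string_line):
--     # single left-to-right pass over the string: record the first position of each spelled number
--     first = {}
--     for i in range(len(string_line)):
--         for w in list_of_spelled_numbers:
--             if w not in first and string_line.startswith(w, i):
--                 first[w] = i
--     # assemble in the canonical word order, keyed by the recorded first index
--     res = {first[w]: w for w in list_of_spelled_numbers if w in first}
--     return res if res else None
-- ===== Notes on version B (the rewrite author's own statement) =====
-- stated objective: alternative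
-- what changed: A scans the whole string once per word (word-first, via 'in' + 'index'); B makes a single position-first left-to-right pass recording each word's first match position, then assembles the same word-ordered dict.
import Mathlib
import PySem

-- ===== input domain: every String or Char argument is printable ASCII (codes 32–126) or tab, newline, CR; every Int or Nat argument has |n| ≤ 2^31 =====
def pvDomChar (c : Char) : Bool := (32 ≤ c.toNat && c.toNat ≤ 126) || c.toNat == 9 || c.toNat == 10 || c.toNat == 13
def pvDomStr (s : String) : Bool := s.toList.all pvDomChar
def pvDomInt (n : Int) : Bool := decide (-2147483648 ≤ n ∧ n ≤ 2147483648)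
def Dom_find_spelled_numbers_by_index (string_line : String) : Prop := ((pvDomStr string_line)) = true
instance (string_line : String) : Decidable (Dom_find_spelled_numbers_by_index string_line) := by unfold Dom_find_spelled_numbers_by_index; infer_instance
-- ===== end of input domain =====

-- B replaces A's word-first scan (one 'in'/'index' pass per word) by one position-first left-to-right
-- pass that records each word's first match position, then assembles the same word-ordered dict.


-- ===== PORT A =====
def pvSpelledWords : List String := ["one", "two", "three", "four", "five", "six", "seven", "eight", "nine"]

-- 'string_line.index(w)' is guarded by 'w in string_line', so it is exactly PySem.Str.find there.
def find_spelled_numbers_by_index (string_line : String) : Option (List (Int × String)) :=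
  let d := pvSpelledWords.foldl
    (fun d w =>
      if PySem.Str.isIn w string_line then d.insert (PySem.Str.find string_line w) w else d)
    (PySem.Dict.empty : PySem.Dict Int String)
  if d.items.isEmpty then none else some d.items

-- ===== PORT B =====
-- inner loop of Source B: at position i, record any word not yet seen that starts at i.
-- 'string_line.startswith(w, i)' with 0 <= i (i comes from range) is exactly
-- startswith(string_line[i:], w): ported via Str.slice + Str.startswith (exact there).
def pvInner (s : String) (i : Int) (first : PySem.Dict String Int) : PySem.Dict String Int :=
  pvSpelledWords.foldl
    (fun first w =>
      if !first.contains w && PySem.Str.startswith (PySem.Str.slice s (some i) none) w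
      then first.insert w i else first)
    first

def pvScanFirst (s : String) : PySem.Dict String Int :=
  (PySem.List.pyRange 0 (PySem.Str.len s)).foldl (fun first i => pvInner s i first)
    (PySem.Dict.empty : PySem.Dict String Int)

def find_spelled_numbers_by_index_alt (string_line : String) : Option (List (Int × String)) :=
  let first := pvScanFirst string_line
  let res := pvSpelledWords.foldl
    (fun res w =>
      match first.get? w with
      | some i => res.insert i w
      | none => res)
    (PySem.Dict.empty : PySem.Dict Int String)
  if res.items.isEmpty then none else some res.items

-- ===== PRECONDITION & SPEC =====
def Spec_find_spelled_numbers_by_index (string_line : String) (out : Option (List (Int × String))) : Prop := out = find_spelled_numbers_by_index_alt string_line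
instance (string_line : String) (out : Option (List (Int × String))) : Decidable (Spec_find_spelled_numbers_by_index string_line out) := by unfold Spec_find_spelled_numbers_by_index; infer_instance

-- ===== CLAIM (what is proved, stated in full; the proofs are below) =====
def Claim_equal_find_spelled_numbers_by_index : Prop := ∀ (string_line : String), Dom_find_spelled_numbers_by_index string_line → Spec_find_spelled_numbers_by_index string_line (find_spelled_numbers_by_index string_line)

-- ===== LEMMAS AND PROOFS =====

-- keys not in the word list are untouched by the inner loop
theorem pv_inner_not_mem (L : List String) (s : String) (i : Int)
    (d : PySem.Dict String Int) (w : String) (hw : w ∉ L) :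
    (L.foldl
      (fun first w =>
        if !first.contains w && PySem.Str.startswith (PySem.Str.slice s (some i) none) w
        then first.insert w i else first) d).get? w = d.get? w := by
  induction L generalizing d with
  | nil => rfl
  | cons a L ih =>
    simp only [List.mem_cons, not_or] at hw
    simp only [List.foldl_cons]
    rw [ih _ hw.2]
    split
    · exact PySem.Dict.get?_insert_of_ne d i hw.1
    · rfl

-- a key already recorded survives the inner loop unchanged
theorem pv_inner_preserve (L : List String) (s : String) (i : Int)
    (d : PySem.Dict String Int) (w : String) (hd : (d.get? w).isSome) :
    (L.foldl
      (fun first w =>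
        if !first.contains w && PySem.Str.startswith (PySem.Str.slice s (some i) none) w
        then first.insert w i else first) d).get? w = d.get? w := by
  induction L generalizing d with
  | nil => rfl
  | cons a L ih =>
    simp only [List.foldl_cons]
    by_cases hcond : (!d.contains a && PySem.Str.startswith (PySem.Str.slice s (some i) none) a) = true
    · rw [if_pos hcond]
      have haw : w ≠ a := by
        rintro rfl
        simp only [Bool.and_eq_true, Bool.not_eq_true'] at hcond
        rw [PySem.Dict.contains_eq_isSome_get?, hd] at hcond
        exact absurd hcond.1 (by simp)
      rw [ih _ (by rw [PySem.Dict.get?_insert_of_ne d i haw]; exact hd),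
        PySem.Dict.get?_insert_of_ne d i haw]
    · rw [if_neg hcond, ih _ hd]

-- a key already recorded survives the whole outer loop unchanged
theorem pv_outer_preserve (I : List Int) (s : String)
    (d : PySem.Dict String Int) (w : String) (hd : (d.get? w).isSome) :
    (I.foldl (fun first i => pvInner s i first) d).get? w = d.get? w := by
  induction I generalizing d with
  | nil => rfl
  | cons i I ih =>
    simp only [List.foldl_cons]
    rw [ih _ (by rw [pvInner, pv_inner_preserve _ _ _ _ _ hd]; exact hd)]
    exact pv_inner_preserve _ _ _ _ _ hd

-- effect of one inner loop on a word it reaches and that is not yet recorded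
theorem pv_inner_get (L : List String) (s : String) (i : Int)
    (d : PySem.Dict String Int) (w : String) (hw : w ∈ L) (hd : d.get? w = none) :
    (L.foldl
      (fun first w =>
        if !first.contains w && PySem.Str.startswith (PySem.Str.slice s (some i) none) w
        then first.insert w i else first) d).get? w =
      if PySem.Str.startswith (PySem.Str.slice s (some i) none) w then some i else none := by
  induction L generalizing d with
  | nil => exact absurd hw (List.not_mem_nil)
  | cons a L ih =>
    simp only [List.foldl_cons]
    by_cases haw : a = w
    · subst haw
      have hc : d.contains a = false := by
        rw [PySem.Dict.contains_eq_isSome_get?, hd]; rfl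
      by_cases hsw : PySem.Str.startswith (PySem.Str.slice s (some i)) a = true
      · rw [if_pos (by rw [hc, hsw]; rfl), if_pos hsw,
          pv_inner_preserve _ _ _ _ _ (by rw [PySem.Dict.get?_insert_self]; rfl),
          PySem.Dict.get?_insert_self]
      · rw [if_neg (by rw [hc]; simp only [Bool.not_false, Bool.true_and]; exact hsw), if_neg hsw]
        by_cases hmem : a ∈ L
        · rw [ih _ hmem hd, if_neg hsw]
        · rw [pv_inner_not_mem _ _ _ _ _ hmem, hd]
    · have hw' : w ∈ L := by
        rcases List.mem_cons.mp hw with h | h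
        · exact absurd h.symm haw
        · exact h
      by_cases hcond : (!d.contains a && PySem.Str.startswith (PySem.Str.slice s (some i) none) a) = true
      · rw [if_pos hcond]
        exact ih _ hw' (by rw [PySem.Dict.get?_insert_of_ne d i (Ne.symm haw)]; exact hd)
      · rw [if_neg hcond]
        exact ih _ hw' hd

theorem pv_words_ne_nil (w : String) (hw : w ∈ pvSpelledWords) : w.toList ≠ [] := by
  simp only [pvSpelledWords, List.mem_cons, List.not_mem_nil, or_false] at hw
  rcases hw with rfl | rfl | rfl | rfl | rfl | rfl | rfl | rfl | rfl <;> decide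

-- the position-first scan from position k onward computes Python's s.find(w) when no match lies before k
theorem pv_outer (s : String) (w : String) (hw : w ∈ pvSpelledWords) (hne : w.toList ≠ []) :
    ∀ (m k : Nat) (d : PySem.Dict String Int), k ≤ s.toList.length →
    m = s.toList.length - k → d.get? w = none →
    (∀ j, j < k → ¬ w.toList <+: s.toList.drop j) →
    ((PySem.List.pyRange (k : Int) (PySem.Str.len s)).foldl
        (fun first i => pvInner s i first) d).get? w =
      if PySem.Str.isIn w s then some (PySem.Str.find s w) else none := by
  intro m
  induction m with
  | zero =>
    intro k d hk hm hd hbefore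
    have hkn : k = s.toList.length := by omega
    rw [PySem.List.pyRange_one_eq_nil (by rw [PySem.Str.len_eq]; exact_mod_cast le_of_eq hkn.symm)]
    have hfalse : PySem.Str.isIn w s = false := by
      rw [PySem.Str.isIn_eq]
      rw [PySem.Chars.isIn_eq_false_iff]
      intro hinf
      have hpos : 0 ≤ PySem.Chars.find s.toList w.toList :=
        (PySem.Chars.find_nonneg_iff _ _).mpr hinf
      obtain ⟨hpre, _⟩ := PySem.Chars.find_spec hpos
      have hle : (PySem.Chars.find s.toList w.toList).toNat ≤ s.toList.length := by
        have := PySem.Chars.find_le_length s.toList w.toList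
        omega
      by_cases hlt : (PySem.Chars.find s.toList w.toList).toNat < s.toList.length
      · exact hbefore _ (hkn ▸ hlt) hpre
      · have : (PySem.Chars.find s.toList w.toList).toNat = s.toList.length := by omega
        rw [this, List.drop_length, List.prefix_nil] at hpre
        exact hne hpre
    rw [hfalse]
    simpa using hd
  | succ m ih =>
    intro k d hk hm hd hbefore
    have hkn : k < s.toList.length := by omega
    rw [PySem.List.pyRange_one_cons (by rw [PySem.Str.len_eq]; exact_mod_cast hkn),
      List.foldl_cons]
    have hsl : (PySem.Str.slice s (some (k : Int))).toList = s.toList.drop k := by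
      rw [PySem.Str.toList_slice]
      exact PySem.List.slice_from_natCast s.toList k
    have hstart : PySem.Str.startswith (PySem.Str.slice s (some (k : Int))) w = true ↔
        w.toList <+: s.toList.drop k := by
      rw [PySem.Str.startswith_eq, hsl, PySem.Chars.startswith_iff]
    by_cases hmatch : w.toList <+: s.toList.drop k
    · have hget : (pvInner s (k : Int) d).get? w = some (k : Int) := by
        rw [pvInner, pv_inner_get pvSpelledWords s _ d w hw hd, if_pos (hstart.mpr hmatch)]
      rw [pv_outer_preserve _ _ _ _ (by rw [hget]; rfl), hget]
      have hisin : PySem.Chars.isIn w.toList s.toList = true :=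
        (PySem.Chars.exists_prefix_drop_iff_isIn _ _).mp ⟨k, hmatch⟩
      rw [if_pos (by rw [PySem.Str.isIn_eq]; exact hisin)]
      have hpos : 0 ≤ PySem.Chars.find s.toList w.toList :=
        (PySem.Chars.find_nonneg_iff _ _).mpr ((PySem.Chars.isIn_iff_infix _ _).mp hisin)
      obtain ⟨hpre, hmin⟩ := PySem.Chars.find_spec hpos
      have h1 : ¬ (PySem.Chars.find s.toList w.toList).toNat < k := fun hlt =>
        hbefore _ hlt hpre
      have h2 : ¬ k < (PySem.Chars.find s.toList w.toList).toNat := fun hlt =>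
        hmin k hlt hmatch
      have : PySem.Chars.find s.toList w.toList = (k : Int) := by omega
      rw [PySem.Str.find_eq, this]
    · have hget : (pvInner s (k : Int) d).get? w = none := by
        rw [pvInner, pv_inner_get pvSpelledWords s _ d w hw hd,
          if_neg (fun h => hmatch (hstart.mp h))]
      have hcast : ((k : Int) + 1) = ((k + 1 : Nat) : Int) := by push_cast; ring
      rw [hcast]
      exact ih (k + 1) _ (by omega) (by omega) hget
        (fun j hj => by
          rcases Nat.lt_succ_iff_lt_or_eq.mp hj with h | h
          · exact hbefore j h
          · exact h ▸ hmatch)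

theorem pv_scan_get (s : String) (w : String) (hw : w ∈ pvSpelledWords) :
    (pvScanFirst s).get? w =
      if PySem.Str.isIn w s then some (PySem.Str.find s w) else none := by
  have h0 : ((0 : Nat) : Int) = (0 : Int) := rfl
  rw [pvScanFirst, ← h0]
  exact pv_outer s w hw (pv_words_ne_nil w hw) s.toList.length 0 _ (Nat.zero_le _)
    (by omega) (PySem.Dict.get?_empty w) (fun j hj => absurd hj (Nat.not_lt_zero j))

-- the assembly loop of B equals the loop of A once pv_scan_get is known
theorem pv_assemble (L : List String) (s : String)
    (hL : ∀ w ∈ L, (pvScanFirst s).get? w =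
      if PySem.Str.isIn w s then some (PySem.Str.find s w) else none)
    (d : PySem.Dict Int String) :
    L.foldl
      (fun res w =>
        match (pvScanFirst s).get? w with
        | some i => res.insert i w
        | none => res) d =
    L.foldl
      (fun d w =>
        if PySem.Str.isIn w s then d.insert (PySem.Str.find s w) w else d) d := by
  induction L generalizing d with
  | nil => rfl
  | cons a L ih =>
    simp only [List.foldl_cons]
    rw [hL a (List.mem_cons_self)]
    by_cases h : PySem.Str.isIn a s = true
    · simp only [h, if_true]
      exact ih (fun w hw => hL w (List.mem_cons_of_mem _ hw)) (d.insert (PySem.Str.find s a) a)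
    · rw [Bool.not_eq_true] at h
      simp only [h]
      exact ih (fun w hw => hL w (List.mem_cons_of_mem _ hw)) d

-- ===== VERDICT (by name: the statement is the Claim_ definition above) =====
theorem find_spelled_numbers_by_index_spec : Claim_equal_find_spelled_numbers_by_index := by
  intro s _
  unfold Spec_find_spelled_numbers_by_index
  simp only [find_spelled_numbers_by_index, find_spelled_numbers_by_index_alt]
  rw [pv_assemble pvSpelledWords s (fun w hw => pv_scan_get s w hw)]
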